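-- pv_equiv track=rewrite | github.com/eyurtsev/FlowCytometryTools | FlowCytometryTools/core/bases.py | int2letters
-- ===== SOURCE A (Python) =====
-- def int2letters(x, alphabet):
--     """
--     Return the alphabet representation of a non-negative integer x.
--     For example, with alphabet=['a','b']
--     0 -> 'a'
--     1 -> 'b'
--     2 -> 'aa'
--     3 -> 'ab'
--     4 -> 'ba'
--
--     Modified from:
--     http://stackoverflow.com/questions/2267362/convert-integer-to-a-string-in-a-given-numeric-base-in-python
--     """
--     base = len(alphabet)
--     if x < 0:
--         raise ValueError('Only non-negative numbers are supported. Encountered %s' % x)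
--     letters = []
--     quotient = x
--     while quotient >= 0:
--         quotient, remainder = divmod(quotient, base)
--         quotient -= 1
--         letters.append(alphabet[remainder])
--     letters.reverse()
--     return ''.join(letters)
-- ===== SOURCE B (Python) =====
-- def int2letters(x, alphabet):
--     if x < 0:
--         raise ValueError('Only non-negative numbers are supported. Encountered %s' % x)
--     base = len(alphabet)
--     # phase 1: find k, the number of letters, and `first`, the smallest
--     # integer whose representation has k letters (= base + base**2 + ...)
--     k = 1
--     first = 0
--     while x - first >= base ** k:
--         first += base ** k
--         k += 1
--     # phase 2: m is the rank of x among the k-letter strings; write m in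
--     # ordinary base-`base` notation with exactly k digits, most significant first
--     m = x - first
--     out = ''
--     for i in range(k):
--         out = alphabet[(m // base ** i) % base] + out
--     return out
-- ===== Notes on version B (the rewrite author's own statement) =====
-- stated objective: alternative
-- what changed: A collects remainders least-significant-first into a list, reverses it and joins; B instead first computes the output length k (and the smallest k-letter value) by summing powers of the base, then extracts the digits most-significant-first by power division, building the string directly with no list, no reverse and no join.
import Mathlib
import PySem

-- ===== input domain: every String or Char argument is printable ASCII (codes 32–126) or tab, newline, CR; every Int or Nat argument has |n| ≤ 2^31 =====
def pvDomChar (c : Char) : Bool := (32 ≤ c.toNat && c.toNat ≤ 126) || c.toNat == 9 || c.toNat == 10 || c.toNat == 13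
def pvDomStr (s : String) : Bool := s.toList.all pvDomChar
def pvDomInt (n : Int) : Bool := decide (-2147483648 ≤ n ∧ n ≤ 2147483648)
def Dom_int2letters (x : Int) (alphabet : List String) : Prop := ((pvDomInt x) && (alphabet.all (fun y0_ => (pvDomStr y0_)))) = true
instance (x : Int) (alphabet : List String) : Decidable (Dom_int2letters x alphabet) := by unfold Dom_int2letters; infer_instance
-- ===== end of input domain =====

-- B replaces A's remainder-list + reverse + join with a two-phase construction: first the output
-- length k (and the smallest k-letter value) by summing powers of the base, then the digits
-- most-significant-first by power division, prepended directly to the string (objective: alternative).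

-- ===== PORT A =====
-- the 'while quotient >= 0' loop of A; ZeroDivisionError (empty alphabet) is the `none` branch, outside Pre_
def i2lLoop (alphabet : List String) (q : Int) (letters : List String) : List String :=
  if hq : 0 ≤ q then
    match hdm : PySem.Int.divmod? q (alphabet.length : Int) with
    | none => letters
    | some qr =>
        i2lLoop alphabet (qr.1 - 1) (letters ++ [PySem.List.pyGetD alphabet qr.2 ""])
  else letters
termination_by (q + 1).toNat
decreasing_by
  simp only [PySem.Int.divmod?] at hdm
  split at hdm
  · exact absurd hdm (by simp)
  · rename_i hb
    have hb1 : 1 ≤ (alphabet.length : Int) := by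
      have : (0:Int) ≤ (alphabet.length : Int) := Int.natCast_nonneg _
      omega
    have : qr.1 = Int.fdiv q (alphabet.length : Int) := by cases hdm; rfl
    have hfd : Int.fdiv q (alphabet.length : Int) = q / (alphabet.length : Int) :=
      Int.fdiv_eq_ediv_of_nonneg _ (by omega)
    have h2 : q / (alphabet.length : Int) ≤ q := Int.ediv_le_self _ hq
    omega

def int2letters (x : Int) (alphabet : List String) : String :=
  if x < 0 then ""   -- Python raises ValueError here; outside Pre_
  else
    let letters := i2lLoop alphabet x []
    String.join letters.reverse

-- ===== PORT B =====
-- phase 1 of Source B: k and first (= base + base^2 + ... + base^(k-1)), the same loop as Source B.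
-- The 'alphabet.length = 0' guard only makes the function total: there Python B diverges (outside Pre_).
def i2lFindK (x : Int) (alphabet : List String) (k : Nat) (first : Int) : Nat × Int :=
  if alphabet.length = 0 then (k, first)
  else if h : (alphabet.length : Int) ^ k ≤ x - first then
    i2lFindK x alphabet (k + 1) (first + (alphabet.length : Int) ^ k)
  else (k, first)
termination_by (x - first).toNat
decreasing_by
  rename_i hb
  have hb1 : 1 ≤ (alphabet.length : Int) := by
    have : (0:Int) ≤ (alphabet.length : Int) := Int.natCast_nonneg _
    omega
  have hpow : 1 ≤ (alphabet.length : Int) ^ k := one_le_pow₀ hb1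
  omega

-- sFun b k = b + b^2 + ... + b^(k-1) (for k ≥ 1): the smallest integer with k letters

-- phase 2 of Source B: 'for i in range(k): out = alphabet[(m // base ** i) % base] + out'
-- (base ** i with i ≥ 0 drawn from range(k) is ported as ^ on the Nat i.toNat — exact there)
def int2letters_alt (x : Int) (alphabet : List String) : String :=
  if x < 0 then ""
  else
    let base : Int := (alphabet.length : Int)
    let kf := i2lFindK x alphabet 1 0
    let m := x - kf.2
    (PySem.List.pyRange 0 (kf.1 : Int) 1).foldl
      (fun out i =>
        PySem.List.pyGetD alphabet (PySem.Int.mod (PySem.Int.floordiv m (base ^ i.toNat)) base) "" ++ out)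
      ""

-- ===== PRECONDITION & SPEC =====
-- Pre_ excludes exactly the inputs on which Python A raises: x < 0 (ValueError) and the
-- empty alphabet (ZeroDivisionError in divmod).
def Pre_int2letters (x : Int) (alphabet : List String) : Prop := 0 ≤ x ∧ alphabet ≠ []
instance (x : Int) (alphabet : List String) : Decidable (Pre_int2letters x alphabet) := by
  unfold Pre_int2letters; infer_instance

def pvWitness_int2letters : Int × List String := (7, ["a", "b"])

def Spec_int2letters (x : Int) (alphabet : List String) (out : String) : Prop := out = int2letters_alt x alphabet
instance (x : Int) (alphabet : List String) (out : String) : Decidable (Spec_int2letters x alphabet out) := by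
  unfold Spec_int2letters; infer_instance

-- ===== CLAIM (what is proved, stated in full; the proofs are below) =====
def Claim_equal_int2letters : Prop := ∀ (x : Int) (alphabet : List String), Dom_int2letters x alphabet → Pre_int2letters x alphabet → Spec_int2letters x alphabet (int2letters x alphabet)

-- ===== LEMMAS AND PROOFS =====

-- the reference function: the bijective-base representation, by recursion (proof-only helper;
-- both ports are shown equal to it)
def i2lRef (alphabet : List String) (n : Nat) : String :=
  if alphabet.length = 0 then ""
  else if n < alphabet.length then alphabet.getD n ""
  else i2lRef alphabet (n / alphabet.length - 1) ++ alphabet.getD (n % alphabet.length) ""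
termination_by n
decreasing_by
  rename_i hb h
  have h1 : n / alphabet.length ≤ n := Nat.div_le_self _ _
  have h2 : 1 ≤ n / alphabet.length := Nat.one_le_div_iff (by omega) |>.mpr (by omega)
  omega

theorem join_append_singleton (l : List String) (s : String) :
    String.join (l ++ [s]) = String.join l ++ s := by
  simp only [String.join, List.foldl_append, List.foldl_cons, List.foldl_nil]

theorem divmod?_some {q b q' r : Int} (h : PySem.Int.divmod? q b = some (q', r)) :
    b ≠ 0 ∧ q' = Int.fdiv q b ∧ r = Int.fmod q b := by
  simp only [PySem.Int.divmod?] at h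
  split at h
  · exact absurd h (by simp)
  · rename_i hb
    refine ⟨hb, ?_, ?_⟩ <;> cases h <;> rfl

theorem i2lLoop_append (alphabet : List String) (q : Int) (letters : List String) :
    i2lLoop alphabet q letters = letters ++ i2lLoop alphabet q [] := by
  induction hn : (q + 1).toNat using Nat.strong_induction_on generalizing q letters with
  | _ n ih =>
    rw [i2lLoop.eq_def, i2lLoop.eq_def (letters := [])]
    by_cases hq : 0 ≤ q
    · simp only [dif_pos hq]
      rcases hdm : PySem.Int.divmod? q (alphabet.length : Int) with _ | ⟨q', r⟩
      · simp
      · obtain ⟨hb, hq', hr⟩ := divmod?_some hdm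
        have hb1 : 1 ≤ (alphabet.length : Int) := by
          have : (0:Int) ≤ (alphabet.length : Int) := Int.natCast_nonneg _
          omega
        have hfd : Int.fdiv q (alphabet.length : Int) = q / (alphabet.length : Int) :=
          Int.fdiv_eq_ediv_of_nonneg _ (by omega)
        have hdec : (q' - 1 + 1).toNat < n := by
          have h1 : 0 ≤ q / (alphabet.length : Int) := Int.ediv_nonneg hq (by omega)
          have h2 : q / (alphabet.length : Int) ≤ q := Int.ediv_le_self _ hq
          omega
        show i2lLoop alphabet (q' - 1) (letters ++ [PySem.List.pyGetD alphabet r ""]) =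
          letters ++ i2lLoop alphabet (q' - 1) ([] ++ [PySem.List.pyGetD alphabet r ""])
        rw [ih _ hdec (q' - 1) _ rfl, List.nil_append,
          ih _ hdec (q' - 1) [PySem.List.pyGetD alphabet r ""] rfl]
        simp
    · simp [hq]

theorem portA_eq_ref (alphabet : List String) (hb : alphabet ≠ []) (q : Int) (hq : 0 ≤ q) :
    String.join (i2lLoop alphabet q []).reverse = i2lRef alphabet q.toNat := by
  induction hn : (q + 1).toNat using Nat.strong_induction_on generalizing q with
  | _ n ih =>
    have hlen : alphabet.length ≠ 0 := by simpa using hb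
    have hb1 : 1 ≤ (alphabet.length : Int) := by
      have : (0:Int) ≤ (alphabet.length : Int) := Int.natCast_nonneg _
      omega
    rw [i2lLoop.eq_def]
    simp only [dif_pos hq]
    have hdm : PySem.Int.divmod? q (alphabet.length : Int) =
        some (q / (alphabet.length : Int), q % (alphabet.length : Int)) := by
      simp only [PySem.Int.divmod?, if_neg (by omega : ¬ (alphabet.length : Int) = 0)]
      rw [Int.fdiv_eq_ediv_of_nonneg _ (by omega), Int.fmod_eq_emod_of_nonneg _ (by omega)]
    rw [hdm]
    show String.join (i2lLoop alphabet (q / (alphabet.length : Int) - 1)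
        ([] ++ [PySem.List.pyGetD alphabet (q % (alphabet.length : Int)) ""])).reverse = _
    rw [List.nil_append, i2lLoop_append]
    set d := PySem.List.pyGetD alphabet (q % (alphabet.length : Int)) "" with hd
    rw [List.reverse_append, List.reverse_singleton]
    -- join ([d].reverse ++ ...) hmm: ([d] ++ L).reverse = L.reverse ++ [d]
    rw [join_append_singleton]
    have hmod : q % (alphabet.length : Int) = ((q.toNat % alphabet.length : Nat) : Int) := by
      rw [show q = ((q.toNat : Nat) : Int) by omega]
      exact (Int.natCast_mod q.toNat alphabet.length).symm
    have hdval : d = alphabet.getD (q.toNat % alphabet.length) "" := by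
      rw [hd, hmod, PySem.List.pyGetD_natCast]
    by_cases hsmall : q < (alphabet.length : Int)
    · have hq0 : q / (alphabet.length : Int) = 0 := Int.ediv_eq_zero_of_lt hq hsmall
      rw [hq0]
      rw [show i2lLoop alphabet (0 - 1) [] = [] by rw [i2lLoop.eq_def]; simp]
      rw [i2lRef]
      rw [if_neg hlen, if_pos (by omega)]
      rw [hdval, Nat.mod_eq_of_lt (by omega : q.toNat < alphabet.length)]
      simp [String.join]
    · have hdivcast : q / (alphabet.length : Int) = ((q.toNat / alphabet.length : Nat) : Int) := by
        rw [show q = ((q.toNat : Nat) : Int) by omega]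
        exact (Int.natCast_div q.toNat alphabet.length).symm
      have hge1 : 1 ≤ q.toNat / alphabet.length :=
        Nat.one_le_div_iff (by omega) |>.mpr (by omega)
      have htonat : (q / (alphabet.length : Int) - 1).toNat = q.toNat / alphabet.length - 1 := by
        omega
      have hdec : (q / (alphabet.length : Int) - 1 + 1).toNat < n := by
        have h2 : q / (alphabet.length : Int) ≤ q := Int.ediv_le_self _ hq
        have h1 : 0 ≤ q / (alphabet.length : Int) := Int.ediv_nonneg hq (by omega)
        omega
      rw [ih _ hdec _ (by omega) rfl, htonat]
      conv_rhs => rw [i2lRef]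
      rw [if_neg hlen, if_neg (by omega : ¬ q.toNat < alphabet.length), hdval]

def sFun (b : Int) : Nat → Int
  | 0 => 0
  | 1 => 0
  | (k+2) => sFun b (k+1) + b ^ (k+1)

theorem sFun_nonneg (b : Int) (hb : 1 ≤ b) (k : Nat) : 0 ≤ sFun b k := by
  induction k with
  | zero => simp [sFun]
  | succ k ih =>
    match k with
    | 0 => simp [sFun]
    | k+1 =>
      have : (0:Int) ≤ b ^ (k+1) := by positivity
      simp only [sFun]; omega

theorem sFun_succ (b : Int) (k : Nat) (hk : 1 ≤ k) : sFun b (k+1) = sFun b k + b ^ k := by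
  match k with
  | k+1 => rfl

theorem sFun_aux (b : Int) (k : Nat) (hk : 1 ≤ k) :
    b + b * sFun b k = sFun b k + b ^ k := by
  induction k with
  | zero => omega
  | succ k ih =>
    rcases Nat.eq_zero_or_pos k with rfl | hkpos
    · simp [sFun]
    · rw [sFun_succ b k hkpos]
      linear_combination ih hkpos

theorem sFun_mul (b : Int) (hb : 1 ≤ b) (k : Nat) (hk : 1 ≤ k) :
    sFun b (k+1) = b * (1 + sFun b k) := by
  rw [sFun_succ b k hk]
  linear_combination - sFun_aux b k hk

theorem sFun_le (b : Int) (hb : 1 ≤ b) {m n : Nat} (h : m ≤ n) : sFun b m ≤ sFun b n := by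
  induction n with
  | zero => simp_all
  | succ n ih =>
    rcases Nat.lt_or_ge m (n+1) with hlt | hge
    · have hmn : m ≤ n := by omega
      rcases Nat.eq_zero_or_pos n with rfl | hn
      · interval_cases m <;> simp [sFun]
      · have : sFun b n ≤ sFun b (n+1) := by
          rw [sFun_succ b n hn]
          have : (0:Int) ≤ b ^ n := by positivity
          omega
        exact le_trans (ih hmn) this
    · have : m = n + 1 := by omega
      subst this; rfl

theorem findK_spec (x : Int) (alphabet : List String) (hlen : alphabet.length ≠ 0) :
    ∀ (k : Nat) (first : Int), 1 ≤ k → first = sFun (alphabet.length : Int) k →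
      first ≤ x →
      (i2lFindK x alphabet k first).2 = sFun (alphabet.length : Int) (i2lFindK x alphabet k first).1 ∧
      1 ≤ (i2lFindK x alphabet k first).1 ∧
      sFun (alphabet.length : Int) (i2lFindK x alphabet k first).1 ≤ x ∧
      x < sFun (alphabet.length : Int) ((i2lFindK x alphabet k first).1 + 1) := by
  intro k first
  induction hn : (x - first).toNat using Nat.strong_induction_on generalizing k first with
  | _ n ih =>
    intro hk hfirst hfx
    have hb1 : 1 ≤ (alphabet.length : Int) := by
      have : (0:Int) ≤ (alphabet.length : Int) := Int.natCast_nonneg _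
      omega
    have hpow : 1 ≤ (alphabet.length : Int) ^ k := one_le_pow₀ hb1
    rw [i2lFindK.eq_def]
    rw [if_neg hlen]
    by_cases h : (alphabet.length : Int) ^ k ≤ x - first
    · rw [dif_pos h]
      have hdec : (x - (first + (alphabet.length : Int) ^ k)).toNat < n := by omega
      exact ih ((x - (first + (alphabet.length : Int) ^ k)).toNat) hdec (k+1) _ rfl
        (by omega) (by rw [hfirst, sFun_succ _ k hk]) (by omega)
    · rw [dif_neg h]
      subst hfirst
      refine ⟨rfl, hk, hfx, ?_⟩
      show x < sFun (alphabet.length : Int) (k + 1)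
      rw [sFun_succ _ k hk]
      omega

-- the emit fold of port B, on the Nat side

def i2lEmit (alphabet : List String) (k : Nat) (mn : Nat) : String :=
  (List.range k).foldl
    (fun out j => alphabet.getD ((mn / alphabet.length ^ j) % alphabet.length) "" ++ out) ""

theorem emit_succ (alphabet : List String) (k : Nat) (mn : Nat) :
    i2lEmit alphabet (k+1) mn =
      alphabet.getD ((mn / alphabet.length ^ k) % alphabet.length) "" ++ i2lEmit alphabet k mn := by
  simp [i2lEmit, List.range_succ]

theorem emit_shift (alphabet : List String) (k : Nat) (mn : Nat) :
    i2lEmit alphabet (k+1) mn =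
      i2lEmit alphabet k (mn / alphabet.length) ++ alphabet.getD (mn % alphabet.length) "" := by
  induction k with
  | zero =>
    rw [emit_succ]
    show _ ++ "" = "" ++ _
    simp
  | succ k ih =>
    rw [emit_succ, ih, emit_succ, ← String.append_assoc]
    congr 2
    rw [Nat.div_div_eq_div_mul, pow_succ, mul_comm (alphabet.length ^ k) alphabet.length]

theorem digit_eq (alphabet : List String) (hlen : alphabet.length ≠ 0) (m : Int) (hm : 0 ≤ m) (j : Nat) :
    PySem.List.pyGetD alphabet
        (PySem.Int.mod (PySem.Int.floordiv m ((alphabet.length : Int) ^ j)) (alphabet.length : Int)) "" =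
      alphabet.getD ((m.toNat / alphabet.length ^ j) % alphabet.length) "" := by
  have hb1 : 0 < (alphabet.length : Int) := by
    have : (0:Int) ≤ (alphabet.length : Int) := Int.natCast_nonneg _
    omega
  have hpj : (0:Int) < (alphabet.length : Int) ^ j := by positivity
  rw [PySem.Int.floordiv_eq_ediv_of_pos hpj ..]
  rw [PySem.Int.mod_eq_emod_of_pos hb1 ..]
  have hidx : (m / (alphabet.length : Int) ^ j) % (alphabet.length : Int) =
      (((m.toNat / alphabet.length ^ j) % alphabet.length : Nat) : Int) := by
    rw [show m = ((m.toNat : Nat) : Int) by omega,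
      Int.natCast_mod, Int.natCast_div, Int.natCast_pow, Int.toNat_natCast]
  rw [hidx, PySem.List.pyGetD_natCast]

theorem emit_repr (alphabet : List String) (hlen : alphabet.length ≠ 0) :
    ∀ (K : Nat) (x : Int), 1 ≤ K →
      sFun (alphabet.length : Int) K ≤ x → x < sFun (alphabet.length : Int) (K+1) →
      i2lEmit alphabet K (x - sFun (alphabet.length : Int) K).toNat = i2lRef alphabet x.toNat := by
  intro K
  have hb1 : 1 ≤ (alphabet.length : Int) := by
    have : (0:Int) ≤ (alphabet.length : Int) := Int.natCast_nonneg _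
    omega
  induction K with
  | zero => omega
  | succ K ih =>
    intro x hK hlo hhi
    rcases Nat.eq_zero_or_pos K with rfl | hKpos
    · -- one letter: sFun 1 = 0 ≤ x < sFun 2 = len
      have hx0 : 0 ≤ x := by simpa [sFun] using hlo
      have hxlt : x < (alphabet.length : Int) := by
        have h2 : sFun (alphabet.length : Int) 2 = (alphabet.length : Int) := by
          simp [sFun]
        rw [h2] at hhi
        exact hhi
      rw [show (x - sFun (alphabet.length : Int) 1) = x by simp [sFun]]
      rw [emit_succ]
      show _ ++ i2lEmit alphabet 0 x.toNat = _
      rw [show i2lEmit alphabet 0 x.toNat = "" from rfl]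
      rw [i2lRef, if_neg hlen, if_pos (by omega)]
      simp [Nat.mod_eq_of_lt (show x.toNat < alphabet.length by omega)]
    · -- K+1 letters, K ≥ 1
      have hSmul : sFun (alphabet.length : Int) (K+1) =
          (alphabet.length : Int) * (1 + sFun (alphabet.length : Int) K) :=
        sFun_mul _ hb1 K hKpos
      have hSnn : 0 ≤ sFun (alphabet.length : Int) K := sFun_nonneg _ hb1 K
      have hSnn1 : 0 ≤ sFun (alphabet.length : Int) (K+1) := sFun_nonneg _ hb1 (K+1)
      have hxb : (alphabet.length : Int) ≤ x := by
        have h2 : sFun (alphabet.length : Int) 2 ≤ sFun (alphabet.length : Int) (K+1) :=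
          sFun_le _ hb1 (by omega)
        have h2' : sFun (alphabet.length : Int) 2 = (alphabet.length : Int) := by simp [sFun]
        omega
      have hx0 : 0 ≤ x := by omega
      set b : Int := (alphabet.length : Int) with hbdef
      set m : Int := x - sFun b (K+1) with hmdef
      have hm0 : 0 ≤ m := by omega
      -- x' = x / b - 1, the recursive argument of i2lRef (on the Int side)
      set x' : Int := x / b - 1 with hx'def
      have hx'lo : sFun b K ≤ x' := by
        have : 1 + sFun b K ≤ x / b := by
          rw [Int.le_ediv_iff_mul_le (by omega), mul_comm]
          omega
        omega
      have hx'hi : x' < sFun b (K+1) := by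
        have : x / b < 1 + sFun b (K+1) := by
          rw [Int.ediv_lt_iff_lt_mul (by omega), mul_comm]
          have hS2 : sFun b (K+1+1) = b * (1 + sFun b (K+1)) := sFun_mul _ hb1 (K+1) (by omega)
          omega
        omega
      have hx'0 : 0 ≤ x' := by omega
      -- m / b = x' - sFun b K
      have hmdiv : m / b = x' - sFun b K := by
        have hxdm : b * (x / b) + x % b = x := Int.mul_ediv_add_emod x b
        have hm' : m = x % b + (x' - sFun b K) * b := by
          rw [hmdef, hSmul, hx'def]
          linear_combination - hxdm
        rw [hm', Int.add_mul_ediv_right _ _ (by omega : b ≠ 0)]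
        rw [Int.ediv_eq_zero_of_lt (Int.emod_nonneg x (by omega)) (Int.emod_lt_of_pos x (by omega))]
        omega
      -- m % b = x % b
      have hmmod : m % b = x % b := by
        rw [hmdef, hSmul]
        have : x - b * (1 + sFun b K) = x + b * (-(1 + sFun b K)) := by ring
        rw [this, Int.add_mul_emod_self_left]
      -- Nat-side translations
      have hmnd : m.toNat / alphabet.length = (x' - sFun b K).toNat := by
        have h1 : ((m.toNat / alphabet.length : Nat) : Int) = m / b := by
          rw [Int.natCast_div]
          congr 1
          omega
        omega
      have hmnm : m.toNat % alphabet.length = x.toNat % alphabet.length := by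
        have h1 : ((m.toNat % alphabet.length : Nat) : Int) = m % b := by
          rw [Int.natCast_mod]; congr 1; omega
        have h2 : ((x.toNat % alphabet.length : Nat) : Int) = x % b := by
          rw [Int.natCast_mod]; congr 1; omega
        omega
      have hx'nat : x'.toNat = x.toNat / alphabet.length - 1 := by
        have h1 : ((x.toNat / alphabet.length : Nat) : Int) = x / b := by
          rw [Int.natCast_div]; congr 1; omega
        omega
      rw [emit_shift, hmnd, hmnm]
      rw [ih x' hKpos hx'lo hx'hi]
      conv_rhs => rw [i2lRef]
      rw [if_neg hlen, if_neg (by omega : ¬ x.toNat < alphabet.length), hx'nat]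

theorem portB_eq_ref (alphabet : List String) (hb : alphabet ≠ []) (x : Int) (hx : 0 ≤ x) :
    int2letters_alt x alphabet = i2lRef alphabet x.toNat := by
  have hlen : alphabet.length ≠ 0 := by simpa using hb
  rw [int2letters_alt]
  rw [if_neg (by omega)]
  obtain ⟨hF, hK1, hlo, hhi⟩ := findK_spec x alphabet hlen 1 0 (by omega) rfl hx
  set kf := i2lFindK x alphabet 1 0 with hkf
  set m : Int := x - kf.2 with hm
  have hm0 : 0 ≤ m := by rw [hm, hF]; omega
  show (PySem.List.pyRange 0 (kf.1 : Int) 1).foldl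
      (fun out i => PySem.List.pyGetD alphabet
        (PySem.Int.mod (PySem.Int.floordiv m ((alphabet.length : Int) ^ i.toNat)) ((alphabet.length : Int))) "" ++ out)
      "" = i2lRef alphabet x.toNat
  rw [PySem.List.pyRange_zero_natCast, List.foldl_map]
  simp only [Int.toNat_natCast]
  rw [show (fun (out : String) (j : Nat) =>
        PySem.List.pyGetD alphabet
          (PySem.Int.mod (PySem.Int.floordiv m ((alphabet.length : Int) ^ j)) (alphabet.length : Int)) "" ++ out) =
      (fun (out : String) (j : Nat) =>
        alphabet.getD ((m.toNat / alphabet.length ^ j) % alphabet.length) "" ++ out) by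
    funext out j
    rw [digit_eq alphabet hlen m hm0 j]]
  show i2lEmit alphabet kf.1 m.toNat = _
  rw [hm, hF]
  exact emit_repr alphabet hlen kf.1 x hK1 hlo hhi

-- ===== VERDICT (by name: the statement is the Claim_ definition above) =====
theorem int2letters_spec : Claim_equal_int2letters := by
  intro x alphabet _ hpre
  obtain ⟨hx, hb⟩ := hpre
  unfold Spec_int2letters
  rw [int2letters, if_neg (by omega), portA_eq_ref alphabet hb x hx, portB_eq_ref alphabet hb x hx]
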